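-- pv_equiv track=rewrite | github.com/ShashwathKumar/PythonTests | extractRps.py | extractSummaryProp
-- ===== SOURCE A (Python) =====
-- OPEN_BRACE = '{'
--
-- CLOSE_BRACE = '}'
--
-- def extractSummaryProp(rp, prop):
-- 	propIndex = None
-- 	for i, line in enumerate(rp):
-- 		if prop in line:
-- 			propIndex = i
-- 			break
--
-- 	propEndIndex = 0
-- 	propVal = []
-- 	#search through end of a property only if you found the beginning
-- 	if propIndex != None:
-- 		for i, line in enumerate(rp[propIndex:]):
-- 			if CLOSE_BRACE in line and OPEN_BRACE not in line:
-- 				propEndIndex = i + propIndex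
-- 				break
--
-- 		for line in rp[propIndex+1: propEndIndex]:
-- 			propVal.append(line.strip())
-- 	return propVal
-- ===== SOURCE B (Python) =====
-- OPEN_BRACE = '{'
--
-- CLOSE_BRACE = '}'
--
-- def extractSummaryProp(rp, prop):
--     # single linear pass with a state flag instead of find-index + slices
--     acc = None
--     for line in rp:
--         if acc is None:
--             if prop in line:
--                 if CLOSE_BRACE in line and OPEN_BRACE not in line:
--                     return []
--                 acc = []
--         else:
--             if CLOSE_BRACE in line and OPEN_BRACE not in line:
--                 return acc
--             acc.append(line.strip())
--     return []
-- ===== Notes on version B (the rewrite author's own statement) =====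
-- stated objective: alternative
-- what changed: Replaced A's three sequential phases (enumerate-scan for the property line, enumerate-scan of a slice for the closing line, then a slice copy with strip) by one linear pass over the lines with a state flag that starts collecting stripped lines after the property line and returns on the closing line, yielding [] if no closing line is found.
import Mathlib
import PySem

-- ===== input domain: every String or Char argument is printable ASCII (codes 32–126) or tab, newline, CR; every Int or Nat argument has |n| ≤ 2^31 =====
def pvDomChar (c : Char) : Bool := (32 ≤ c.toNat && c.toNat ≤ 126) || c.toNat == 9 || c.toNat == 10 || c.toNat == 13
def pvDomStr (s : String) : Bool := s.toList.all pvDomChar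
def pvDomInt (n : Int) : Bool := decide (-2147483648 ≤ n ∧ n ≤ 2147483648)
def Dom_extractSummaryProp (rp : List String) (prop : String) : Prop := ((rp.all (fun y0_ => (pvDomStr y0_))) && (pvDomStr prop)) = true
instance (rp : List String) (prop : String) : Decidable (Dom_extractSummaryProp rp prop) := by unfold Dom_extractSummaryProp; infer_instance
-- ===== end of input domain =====

-- B replaces A's three sequential scans + slices by a single linear pass with a state flag (same asymptotic cost; different decomposition).


-- ===== PORT A =====
-- first loop of A: first index whose line contains prop (enumerate + break)
def pvFindPropA (rp : List String) (prop : String) (i : Nat) : Option Nat :=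
  match rp with
  | [] => none
  | line :: rest => if PySem.Str.isIn prop line then some i else pvFindPropA rest prop (i + 1)

-- second loop of A: first index (from i) whose line has '}' and no '{'
def pvFindEndA (xs : List String) (i : Nat) : Option Nat :=
  match xs with
  | [] => none
  | line :: rest =>
    if PySem.Str.isIn "}" line && !(PySem.Str.isIn "{" line) then some i
    else pvFindEndA rest (i + 1)

def extractSummaryProp (rp : List String) (prop : String) : List String :=
  match pvFindPropA rp prop 0 with
  | none => []
  | some propIndex =>
    let propEndIndex : Nat :=
      match pvFindEndA (PySem.List.slice rp (some (propIndex : Int)) none) 0 with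
      | none => 0
      | some j => j + propIndex
    (PySem.List.slice rp (some ((propIndex : Int) + 1)) (some (propEndIndex : Int))).map
      PySem.Str.strip

-- ===== PORT B =====
-- B's loop after the property line was found (acc is not None)
def pvCollectB (xs : List String) (acc : List String) : List String :=
  match xs with
  | [] => []
  | line :: rest =>
    if PySem.Str.isIn "}" line && !(PySem.Str.isIn "{" line) then acc
    else pvCollectB rest (acc ++ [PySem.Str.strip line])

-- B's loop while the property line has not been found (acc is None)
def pvScanB (xs : List String) (prop : String) : List String :=
  match xs with
  | [] => []
  | line :: rest =>
    if PySem.Str.isIn prop line then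
      if PySem.Str.isIn "}" line && !(PySem.Str.isIn "{" line) then [] else pvCollectB rest []
    else pvScanB rest prop

def extractSummaryProp_alt (rp : List String) (prop : String) : List String :=
  pvScanB rp prop

-- ===== PRECONDITION & SPEC =====
def Spec_extractSummaryProp (rp : List String) (prop : String) (out : List String) : Prop := out = extractSummaryProp_alt rp prop
instance (rp : List String) (prop : String) (out : List String) : Decidable (Spec_extractSummaryProp rp prop out) := by unfold Spec_extractSummaryProp; infer_instance

-- ===== CLAIM (what is proved, stated in full; the proofs are below) =====
def Claim_equal_extractSummaryProp : Prop := ∀ (rp : List String) (prop : String), Dom_extractSummaryProp rp prop → Spec_extractSummaryProp rp prop (extractSummaryProp rp prop)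

-- ===== LEMMAS AND PROOFS =====

theorem pvFindEndA_shift (xs : List String) (i : Nat) :
    pvFindEndA xs i = (pvFindEndA xs 0).map (· + i) := by
  induction xs generalizing i with
  | nil => simp [pvFindEndA]
  | cons l rest ih =>
    simp only [pvFindEndA]
    split
    · simp
    · rw [ih (i + 1), ih 1, Option.map_map]
      congr 1
      funext j
      simp
      omega

theorem pvFindPropA_shift (xs : List String) (prop : String) (i : Nat) :
    pvFindPropA xs prop i = (pvFindPropA xs prop 0).map (· + i) := by
  induction xs generalizing i with
  | nil => simp [pvFindPropA]
  | cons l rest ih =>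
    simp only [pvFindPropA]
    split
    · simp
    · rw [ih (i + 1), ih 1, Option.map_map]
      congr 1
      funext j
      simp
      omega

theorem pvCollectB_char (xs : List String) (acc : List String) :
    pvCollectB xs acc =
      match pvFindEndA xs 0 with
      | none => []
      | some j => acc ++ (xs.take j).map PySem.Str.strip := by
  induction xs generalizing acc with
  | nil => simp [pvCollectB, pvFindEndA]
  | cons l rest ih =>
    simp only [pvCollectB, pvFindEndA]
    split
    · simp
    · rw [ih, pvFindEndA_shift rest 1]
      cases pvFindEndA rest 0 with
      | none => simp
      | some j => simp

-- A, with both slices unfolded to drop/take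
theorem extractSummaryProp_char (rp : List String) (prop : String) :
    extractSummaryProp rp prop =
      match pvFindPropA rp prop 0 with
      | none => []
      | some p =>
        match pvFindEndA (rp.drop p) 0 with
        | none => []
        | some j => ((rp.drop (p + 1)).take (j + p - (p + 1))).map PySem.Str.strip := by
  simp only [extractSummaryProp]
  cases hp : pvFindPropA rp prop 0 with
  | none => rfl
  | some p =>
    simp only [PySem.List.slice_from_natCast]
    have h1 : ((p : Int) + 1) = ((p + 1 : Nat) : Int) := by push_cast; ring
    cases he : pvFindEndA (rp.drop p) 0 with
    | none =>
      simp only [h1]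
      rw [PySem.List.slice_natCast]
      simp
    | some j =>
      simp only [h1]
      rw [PySem.List.slice_natCast]

-- ===== VERDICT (by name: the statement is the Claim_ definition above) =====
theorem extractSummaryProp_spec : Claim_equal_extractSummaryProp := by
  intro rp prop hd
  clear hd
  unfold Spec_extractSummaryProp extractSummaryProp_alt
  rw [extractSummaryProp_char]
  induction rp with
  | nil => simp [pvFindPropA, pvScanB]
  | cons l rest ih =>
    simp only [pvScanB, pvFindPropA]
    cases hprop : PySem.Str.isIn prop l with
    | true =>
      simp only [if_true, List.drop_zero]
      rw [pvCollectB_char rest []]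
      rw [show pvFindEndA (l :: rest) 0
            = if PySem.Str.isIn "}" l && !(PySem.Str.isIn "{" l) then some 0
              else pvFindEndA rest 1 from rfl]
      cases hend : (PySem.Str.isIn "}" l && !(PySem.Str.isIn "{" l)) with
      | true => simp
      | false =>
        simp only [Bool.false_eq_true, if_false]
        rw [pvFindEndA_shift rest 1]
        cases pvFindEndA rest 0 with
        | none => simp
        | some j =>
          have hj : j + 1 + 0 - (0 + 1) = j := by omega
          simp [hj]
    | false =>
      simp only [Bool.false_eq_true, if_false]
      rw [pvFindPropA_shift rest prop 1, ← ih]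
      cases pvFindPropA rest prop 0 with
      | none => rfl
      | some p =>
        simp only [Option.map_some, List.drop_succ_cons]
        cases pvFindEndA (rest.drop p) 0 with
        | none => rfl
        | some j =>
          have hj : j + (p + 1) - (p + 1 + 1) = j + p - (p + 1) := by omega
          simp [hj]
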